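-- pv_equiv track=rewrite | github.com/dearlordlt/silly-media | src/silly_media/audio/maya.py | _unpack_snac_frames
-- ===== SOURCE A (Python) =====
-- CODE_TOKEN_OFFSET = 128266
--
-- SNAC_TOKENS_PER_FRAME = 7
--
-- def _unpack_snac_frames(snac_tokens: list[int]) -> list[list[int]]:
--     """Unpack 7-token SNAC frames to 3 hierarchical levels.
--
--     Maya uses 7 tokens per frame with hierarchical structure:
--     - Level 1: 1 token per frame (~12 Hz)
--     - Level 2: 2 tokens per frame (~23 Hz)
--     - Level 3: 4 tokens per frame (~47 Hz)
--     """
--     frames = len(snac_tokens) // SNAC_TOKENS_PER_FRAME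
--     snac_tokens = snac_tokens[: frames * SNAC_TOKENS_PER_FRAME]
--
--     l1, l2, l3 = [], [], []
--
--     for i in range(frames):
--         slots = snac_tokens[i * 7 : (i + 1) * 7]
--         # Level 1: slot 0
--         l1.append((slots[0] - CODE_TOKEN_OFFSET) % 4096)
--         # Level 2: slots 1, 4
--         l2.extend(
--             [
--                 (slots[1] - CODE_TOKEN_OFFSET) % 4096,
--                 (slots[4] - CODE_TOKEN_OFFSET) % 4096,
--             ]
--         )
--         # Level 3: slots 2, 3, 5, 6
--         l3.extend(
--             [
--                 (slots[2] - CODE_TOKEN_OFFSET) % 4096,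
--                 (slots[3] - CODE_TOKEN_OFFSET) % 4096,
--                 (slots[5] - CODE_TOKEN_OFFSET) % 4096,
--                 (slots[6] - CODE_TOKEN_OFFSET) % 4096,
--             ]
--         )
--
--     return [l1, l2, l3]
-- ===== SOURCE B (Python) =====
-- CODE_TOKEN_OFFSET = 128266
--
-- SNAC_TOKENS_PER_FRAME = 7
--
-- def _unpack_snac_frames(snac_tokens: list[int]) -> list[list[int]]:
--     """Column-wise reshape: extract the per-frame slot columns in one
--     enumerate pass each, then interleave them with zip."""
--     frames = len(snac_tokens) // SNAC_TOKENS_PER_FRAME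
--     t = snac_tokens[: frames * SNAC_TOKENS_PER_FRAME]
--
--     def col(k):
--         return [(x - CODE_TOKEN_OFFSET) % 4096
--                 for i, x in enumerate(t)
--                 if i % SNAC_TOKENS_PER_FRAME == k]
--
--     l1 = col(0)
--     l2 = [x for pair in zip(col(1), col(4)) for x in pair]
--     l3 = [x for quad in zip(col(2), col(3), col(5), col(6)) for x in quad]
--     return [l1, l2, l3]
-- ===== Notes on version B (the rewrite author's own statement) =====
-- stated objective: idiomatic
-- what changed: Replaces the per-frame row loop (slice each 7-token frame, append slots to three accumulators) by a column-wise reshape: each slot column is extracted in its own enumerate/modulo pass and the columns are interleaved with zip.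
import Mathlib
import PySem

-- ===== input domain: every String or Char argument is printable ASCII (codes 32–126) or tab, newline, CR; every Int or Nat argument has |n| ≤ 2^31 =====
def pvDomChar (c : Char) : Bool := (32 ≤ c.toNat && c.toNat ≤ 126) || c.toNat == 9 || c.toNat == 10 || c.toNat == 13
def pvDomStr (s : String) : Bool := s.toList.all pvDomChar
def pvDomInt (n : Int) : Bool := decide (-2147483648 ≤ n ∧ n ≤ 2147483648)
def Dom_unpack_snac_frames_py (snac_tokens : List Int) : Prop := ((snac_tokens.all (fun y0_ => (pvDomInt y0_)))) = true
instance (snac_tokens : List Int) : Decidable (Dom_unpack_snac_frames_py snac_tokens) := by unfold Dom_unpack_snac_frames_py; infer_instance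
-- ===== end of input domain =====

-- B replaces A's per-frame row loop by a column-wise reshape (enumerate/modulo column extraction, interleaved with zip); objective: more idiomatic decomposition, same cost.


-- ===== PORT A =====
def pvNormA (x : Int) : Int := PySem.Int.mod (x - 128266) 4096

def unpack_snac_frames_py (snac_tokens : List Int) : List (List Int) :=
  let frames : Int := PySem.Int.floordiv (snac_tokens.length : Int) 7
  let toks := PySem.List.slice snac_tokens none (some (frames * 7))
  let r := (PySem.List.pyRange 0 frames 1).foldl
    (fun (acc : List Int × List Int × List Int) i =>
      let slots := PySem.List.slice toks (some (i * 7)) (some ((i + 1) * 7))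
      (acc.1 ++ [pvNormA (PySem.List.pyGetD slots 0 0)],
       acc.2.1 ++ [pvNormA (PySem.List.pyGetD slots 1 0), pvNormA (PySem.List.pyGetD slots 4 0)],
       acc.2.2 ++ [pvNormA (PySem.List.pyGetD slots 2 0), pvNormA (PySem.List.pyGetD slots 3 0),
                   pvNormA (PySem.List.pyGetD slots 5 0), pvNormA (PySem.List.pyGetD slots 6 0)]))
    ([], [], [])
  [r.1, r.2.1, r.2.2]

-- ===== PORT B =====
def pvNormB (x : Int) : Int := PySem.Int.mod (x - 128266) 4096

-- column k of the frame matrix: the elements whose index is ≡ k (mod 7), normalized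
def pvCol (t : List Int) (k : Int) : List Int :=
  ((PySem.List.enumerate t 0).filter (fun p => PySem.Int.mod p.1 7 == k)).map (fun p => pvNormB p.2)

def unpack_snac_frames_py_alt (snac_tokens : List Int) : List (List Int) :=
  let frames : Int := PySem.Int.floordiv (snac_tokens.length : Int) 7
  let t := PySem.List.slice snac_tokens none (some (frames * 7))
  let l1 := pvCol t 0
  let l2 := ((pvCol t 1).zip (pvCol t 4)).flatMap (fun p => [p.1, p.2])
  let l3 := ((pvCol t 2).zip ((pvCol t 3).zip ((pvCol t 5).zip (pvCol t 6)))).flatMap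
              (fun q => [q.1, q.2.1, q.2.2.1, q.2.2.2])
  [l1, l2, l3]

-- ===== PRECONDITION & SPEC =====
def Spec_unpack_snac_frames_py (snac_tokens : List Int) (out : List (List Int)) : Prop := out = unpack_snac_frames_py_alt snac_tokens
instance (snac_tokens : List Int) (out : List (List Int)) : Decidable (Spec_unpack_snac_frames_py snac_tokens out) := by unfold Spec_unpack_snac_frames_py; infer_instance

-- ===== CLAIM (what is proved, stated in full; the proofs are below) =====
def Claim_equal_unpack_snac_frames_py : Prop := ∀ (snac_tokens : List Int), Dom_unpack_snac_frames_py snac_tokens → Spec_unpack_snac_frames_py snac_tokens (unpack_snac_frames_py snac_tokens)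

-- ===== LEMMAS AND PROOFS =====

-- A's loop body, named for the proofs (definitionally the lambda in port A)
def pvStep (t : List Int) (acc : List Int × List Int × List Int) (i : Int) :
    List Int × List Int × List Int :=
  let slots := PySem.List.slice t (some (i * 7)) (some ((i + 1) * 7))
  (acc.1 ++ [pvNormA (PySem.List.pyGetD slots 0 0)],
   acc.2.1 ++ [pvNormA (PySem.List.pyGetD slots 1 0), pvNormA (PySem.List.pyGetD slots 4 0)],
   acc.2.2 ++ [pvNormA (PySem.List.pyGetD slots 2 0), pvNormA (PySem.List.pyGetD slots 3 0),
               pvNormA (PySem.List.pyGetD slots 5 0), pvNormA (PySem.List.pyGetD slots 6 0)])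

lemma pv_col_snoc (u : List Int) (n : Nat) (hu : u.length = 7 * n)
    (c0 c1 c2 c3 c4 c5 c6 : Int) (k : Nat) (hk : k < 7) :
    pvCol (u ++ [c0, c1, c2, c3, c4, c5, c6]) (k : Int)
      = pvCol u k ++ [pvNormB ([c0, c1, c2, c3, c4, c5, c6].getD k 0)] := by
  unfold pvCol
  rw [PySem.List.enumerate_append, List.filter_append, List.map_append]
  congr 1
  have e : (u.length : Int) = 7 * (n : Int) := by exact_mod_cast hu
  have hm : ∀ x : Int, PySem.Int.mod x 7 = x % 7 := fun _ => PySem.Int.mod_eq_emod_of_pos (by norm_num)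
  have f0 : ((7*(n:Int)) % 7 == (k:Int)) = ((0:Int) == (k:Int)) := by
    rw [show (7*(n:Int)) % 7 = 0 by omega]
  have f1 : ((7*(n:Int)+1) % 7 == (k:Int)) = ((1:Int) == (k:Int)) := by
    rw [show (7*(n:Int)+1) % 7 = 1 by omega]
  have f2 : ((7*(n:Int)+1+1) % 7 == (k:Int)) = ((2:Int) == (k:Int)) := by
    rw [show (7*(n:Int)+1+1) % 7 = 2 by omega]
  have f3 : ((7*(n:Int)+1+1+1) % 7 == (k:Int)) = ((3:Int) == (k:Int)) := by
    rw [show (7*(n:Int)+1+1+1) % 7 = 3 by omega]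
  have f4 : ((7*(n:Int)+1+1+1+1) % 7 == (k:Int)) = ((4:Int) == (k:Int)) := by
    rw [show (7*(n:Int)+1+1+1+1) % 7 = 4 by omega]
  have f5 : ((7*(n:Int)+1+1+1+1+1) % 7 == (k:Int)) = ((5:Int) == (k:Int)) := by
    rw [show (7*(n:Int)+1+1+1+1+1) % 7 = 5 by omega]
  have f6 : ((7*(n:Int)+1+1+1+1+1+1) % 7 == (k:Int)) = ((6:Int) == (k:Int)) := by
    rw [show (7*(n:Int)+1+1+1+1+1+1) % 7 = 6 by omega]
  simp only [PySem.List.enumerate_cons, PySem.List.enumerate_nil, e, hm, zero_add,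
    List.filter_cons, List.filter_nil, f0, f1, f2, f3, f4, f5, f6]
  interval_cases k <;> simp

lemma pv_len7 (ch : List Int) (h : ch.length = 7) :
    ∃ a b c d e f g, ch = [a, b, c, d, e, f, g] := by
  rcases ch with _ | ⟨a, _ | ⟨b, _ | ⟨c, _ | ⟨d, _ | ⟨e, _ | ⟨f, _ | ⟨g, _ | ⟨h8, rest⟩⟩⟩⟩⟩⟩⟩⟩ <;>
    simp_all

lemma pv_col_length (n : Nat) (t : List Int) (ht : t.length = 7 * n) (k : Nat) (hk : k < 7) :
    (pvCol t (k : Int)).length = n := by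
  induction n generalizing t with
  | zero =>
    have : t = [] := List.eq_nil_of_length_eq_zero (by omega)
    subst this
    simp [pvCol, PySem.List.enumerate_nil]
  | succ m ih =>
    have hsplit : t = t.take (7 * m) ++ t.drop (7 * m) := (List.take_append_drop _ t).symm
    have hlu : (t.take (7 * m)).length = 7 * m := by
      rw [List.length_take]; omega
    have hld : (t.drop (7 * m)).length = 7 := by
      rw [List.length_drop]; omega
    obtain ⟨a, b, c, d, e, f, g, hch⟩ := pv_len7 _ hld
    rw [hsplit, hch, pv_col_snoc _ m hlu _ _ _ _ _ _ _ k hk]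
    simp [ih _ hlu]

lemma pv_slice_prefix (u ch : List Int) (m : Nat) (hu : u.length = 7 * m) (i : Int)
    (h0 : 0 ≤ i) (hi : i < m) :
    PySem.List.slice (u ++ ch) (some (i * 7)) (some ((i + 1) * 7))
      = PySem.List.slice u (some (i * 7)) (some ((i + 1) * 7)) := by
  rw [PySem.List.slice_toNat _ (by positivity) (by omega),
      PySem.List.slice_toNat _ (by positivity) (by omega)]
  rw [List.drop_append_of_le_length (by omega)]
  rw [List.take_append_of_le_length (by simp [List.length_drop]; omega)]

set_option maxHeartbeats 1000000 in
lemma pv_core (n : Nat) (t : List Int) (ht : t.length = 7 * n) :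
    (PySem.List.pyRange 0 (n : Int) 1).foldl (pvStep t) ([], [], [])
      = (pvCol t 0,
         ((pvCol t 1).zip (pvCol t 4)).flatMap (fun p => [p.1, p.2]),
         ((pvCol t 2).zip ((pvCol t 3).zip ((pvCol t 5).zip (pvCol t 6)))).flatMap
           (fun q => [q.1, q.2.1, q.2.2.1, q.2.2.2])) := by
  induction n generalizing t with
  | zero =>
    have : t = [] := List.eq_nil_of_length_eq_zero (by omega)
    subst this
    simp [pvCol, PySem.List.enumerate_nil, pysem]
  | succ m ih =>
    have hsplit : t = t.take (7 * m) ++ t.drop (7 * m) := (List.take_append_drop _ t).symm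
    set u := t.take (7 * m) with hu_def
    have hlu : u.length = 7 * m := by rw [hu_def, List.length_take]; omega
    have hld : (t.drop (7 * m)).length = 7 := by rw [List.length_drop]; omega
    obtain ⟨a, b, c, d, e, f, g, hch⟩ := pv_len7 _ hld
    rw [hsplit, hch]
    set ch : List Int := [a, b, c, d, e, f, g] with hch_def
    have hrange : PySem.List.pyRange 0 ((m + 1 : Nat) : Int) 1
        = PySem.List.pyRange 0 (m : Int) 1 ++ [(m : Int)] := by
      push_cast
      exact PySem.List.pyRange_one_succ_right (by omega)
    rw [hrange, List.foldl_append]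
    have hcongr : (PySem.List.pyRange 0 (m : Int) 1).foldl (pvStep (u ++ ch)) ([], [], [])
        = (PySem.List.pyRange 0 (m : Int) 1).foldl (pvStep u) ([], [], []) := by
      apply PySem.List.foldl_congr_mem
      intro acc i hi
      obtain ⟨h0, hilt⟩ := (PySem.List.mem_pyRange_one).1 hi
      unfold pvStep
      rw [pv_slice_prefix u ch m hlu i (by omega) (by omega)]
    rw [hcongr, ih u hlu]
    have hlast : PySem.List.slice (u ++ ch) (some ((m : Int) * 7)) (some (((m : Int) + 1) * 7)) = ch := by
      rw [PySem.List.slice_toNat _ (by positivity) (by positivity)]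
      have h1 : ((m : Int) * 7).toNat = u.length := by omega
      rw [h1, List.drop_left]
      have h2 : (((m : Int) + 1) * 7).toNat - u.length = 7 := by omega
      rw [h2, hch_def]
      rfl
    have c0 := pv_col_snoc u m hlu a b c d e f g 0 (by omega)
    have c1 := pv_col_snoc u m hlu a b c d e f g 1 (by omega)
    have c2 := pv_col_snoc u m hlu a b c d e f g 2 (by omega)
    have c3 := pv_col_snoc u m hlu a b c d e f g 3 (by omega)
    have c4 := pv_col_snoc u m hlu a b c d e f g 4 (by omega)
    have c5 := pv_col_snoc u m hlu a b c d e f g 5 (by omega)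
    have c6 := pv_col_snoc u m hlu a b c d e f g 6 (by omega)
    norm_num at c0 c1 c2 c3 c4 c5 c6
    rw [c0, c1, c2, c3, c4, c5, c6]
    have l1 := pv_col_length m u hlu 1 (by omega)
    have l2 := pv_col_length m u hlu 2 (by omega)
    have l3 := pv_col_length m u hlu 3 (by omega)
    have l4 := pv_col_length m u hlu 4 (by omega)
    have l5 := pv_col_length m u hlu 5 (by omega)
    have l6 := pv_col_length m u hlu 6 (by omega)
    norm_num at l1 l2 l3 l4 l5 l6
    rw [List.zip_append (by rw [l1, l4]),
        List.zip_append (by rw [l5, l6]),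
        List.zip_append (by simp [l3, l5, l6]),
        List.zip_append (by simp [l2, l3, l5, l6])]
    unfold pvStep
    simp only [List.foldl_cons, List.foldl_nil, hlast]
    have g0 : PySem.List.pyGetD ch 0 0 = a := by rw [hch_def]; simp [pysem]
    have g1 : PySem.List.pyGetD ch 1 0 = b := by rw [hch_def]; simp [pysem]
    have g2 : PySem.List.pyGetD ch 2 0 = c := by rw [hch_def]; simp [pysem]
    have g3 : PySem.List.pyGetD ch 3 0 = d := by rw [hch_def]; simp [pysem]
    have g4 : PySem.List.pyGetD ch 4 0 = e := by rw [hch_def]; simp [pysem]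
    have g5 : PySem.List.pyGetD ch 5 0 = f := by rw [hch_def]; simp [pysem]
    have g6 : PySem.List.pyGetD ch 6 0 = g := by rw [hch_def]; simp [pysem]
    simp only [g0, g1, g2, g3, g4, g5, g6, pvNormA, pvNormB]
    simp [List.flatMap_append]

lemma pv_A_eq (xs : List Int) :
    unpack_snac_frames_py xs =
      (let frames : Int := PySem.Int.floordiv (xs.length : Int) 7
       let toks := PySem.List.slice xs none (some (frames * 7))
       let r := (PySem.List.pyRange 0 frames 1).foldl (pvStep toks) ([], [], [])
       [r.1, r.2.1, r.2.2]) := rfl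

-- ===== VERDICT (by name: the statement is the Claim_ definition above) =====
theorem unpack_snac_frames_py_spec : Claim_equal_unpack_snac_frames_py := by
  intro xs _
  unfold Spec_unpack_snac_frames_py
  rw [pv_A_eq]
  unfold unpack_snac_frames_py_alt
  have hframes : PySem.Int.floordiv (xs.length : Int) 7 = ((xs.length / 7 : Nat) : Int) := by
    exact_mod_cast PySem.Int.floordiv_natCast xs.length 7
  simp only [hframes]
  have hcast : ((xs.length / 7 : Nat) : Int) * 7 = ((xs.length / 7 * 7 : Nat) : Int) := by
    push_cast; ring
  rw [hcast, PySem.List.slice_to_natCast]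
  have hlen : (xs.take (xs.length / 7 * 7)).length = 7 * (xs.length / 7) := by
    rw [List.length_take]
    have := Nat.div_mul_le_self xs.length 7
    omega
  rw [pv_core (xs.length / 7) _ hlen]
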